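-- pv_equiv track=rewrite | github.com/dtthuyen/new | utils.py | findWayStage
-- ===== SOURCE A (Python) =====
-- from typing import List
--
-- def findWayStage(way: List[dict]):
--     """
--     Hàm tìm các đoạn thẳng trên đường
--     Trả về các điểm đầu và cuối trên các đoạn
--     Ví dụ:
--     A-----B---------C
--                     |
--                     |
--                     |
--                     D-------E
--     return [A, B, C, D, E]
--     """
--     allStage = [0]
--     time2goal = 0
--     change_his = [False, False]
--     for i, point in enumerate(way):
--         x_change = False
--         y_change = False
--         if i != len(way) - 1:
--             next_point = way[i + 1]
--             if i == 0:
--                 if abs(next_point["x"] - point["x"]) == 1: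
--                     change_his[0] = True
--                 if abs(next_point["y"] - point["y"]) == 1:
--                     change_his[1] = True
--             if abs(next_point["x"] - point["x"]) == 1:
--                 x_change = True
--             if abs(next_point["y"] - point["y"]) == 1:
--                 y_change = True
--             if [x_change, y_change] != change_his:
--                 allStage.append(i)
--         change_his = [x_change, y_change]
--     allStage.append(len(way) - 1)
--     return [way[idx] for idx in allStage]
-- ===== SOURCE B (Python) =====
-- from typing import List
--
-- def findWayStage(way: List[dict]):
--     """Two-pointer run-skipping scan: extend a pointer over each maximal run of
--     equally-directed steps, emitting interior run boundaries; the list always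
--     starts with the first point and is closed with the last point."""
--     def direction(i):
--         return (abs(way[i + 1]["x"] - way[i]["x"]) == 1,
--                 abs(way[i + 1]["y"] - way[i]["y"]) == 1)
--     n1 = len(way) - 1          # number of steps along the path
--     result = [way[0]]
--     i = 0
--     while i < n1:
--         d = direction(i)
--         j = i
--         while j + 1 < n1 and direction(j + 1) == d:
--             j += 1
--         if j + 1 < n1:
--             result.append(way[j + 1])
--         i = j + 1
--     result.append(way[len(way) - 1])
--     return result
-- ===== Notes on version B (the rewrite author's own statement) =====
-- stated objective: alternative
-- what changed: Replaced A's per-index enumerate loop carrying a change_his flag accumulator (with its i==0 special case) by a two-pointer run-skipping scan: an outer loop extends an inner pointer over each maximal run of equally-directed steps, emitting interior run boundaries, with the first and last points added outside the loop.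
import Mathlib
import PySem

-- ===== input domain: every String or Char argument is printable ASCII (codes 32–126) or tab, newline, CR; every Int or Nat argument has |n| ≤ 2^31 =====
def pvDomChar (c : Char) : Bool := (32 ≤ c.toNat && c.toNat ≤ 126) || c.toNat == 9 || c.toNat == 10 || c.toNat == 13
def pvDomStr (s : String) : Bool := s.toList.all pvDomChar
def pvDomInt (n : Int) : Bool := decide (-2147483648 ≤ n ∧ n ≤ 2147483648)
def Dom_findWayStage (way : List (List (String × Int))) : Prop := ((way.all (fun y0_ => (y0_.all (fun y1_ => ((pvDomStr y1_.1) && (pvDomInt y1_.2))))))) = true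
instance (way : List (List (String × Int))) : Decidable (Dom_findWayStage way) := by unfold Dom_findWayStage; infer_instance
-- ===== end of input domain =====

-- B replaces A's per-index loop with its change_his flag accumulator (and i==0 special
-- case) by a two-pointer run-skipping scan: an outer loop extends an inner pointer over
-- each maximal run of equally-directed steps, emitting interior run boundaries,
-- with the first and last points appended outside the loop.
-- Objective: alternative (same cost, different algorithmic organisation).

-- ===== PORT A =====
-- point["x"] (first-match dict lookup); default 0 is never used inside Pre_ (keys present).
def pvKey (p : List (String × Int)) (k : String) : Int :=
  ((PySem.Dict.mk p).get? k).getD 0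

def pvStepA (way : List (List (String × Int))) (st : List Int × (Bool × Bool))
    (ip : Int × List (String × Int)) : List Int × (Bool × Bool) :=
  let i := ip.1
  let point := ip.2
  if i ≠ (way.length : Int) - 1 then
    let next_point := (PySem.List.pyGet? way (i + 1)).getD []
    let change_his :=
      if i = 0 then
        (if (pvKey next_point "x" - pvKey point "x").natAbs = 1 then true else st.2.1,
         if (pvKey next_point "y" - pvKey point "y").natAbs = 1 then true else st.2.2)
      else st.2
    let x_change := if (pvKey next_point "x" - pvKey point "x").natAbs = 1 then true else false
    let y_change := if (pvKey next_point "y" - pvKey point "y").natAbs = 1 then true else false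
    let allStage := if (x_change, y_change) ≠ change_his then st.1 ++ [i] else st.1
    (allStage, (x_change, y_change))
  else (st.1, (false, false))

def findWayStage (way : List (List (String × Int))) : List (List (String × Int)) :=
  let r := (PySem.List.enumerate way 0).foldl (pvStepA way) ([0], (false, false))
  let allStage := r.1 ++ [(way.length : Int) - 1]
  allStage.map (fun idx => (PySem.List.pyGet? way idx).getD [])

-- ===== PORT B =====
-- direction of the step from p to q (B's local `direction`, as a pair of points)
def pvDir (p q : List (String × Int)) : Bool × Bool :=
  (if (pvKey q "x" - pvKey p "x").natAbs = 1 then true else false,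
   if (pvKey q "y" - pvKey p "y").natAbs = 1 then true else false)

-- direction(i); indices produced by B are nonnegative and in range on every input where
-- the Python returns (Python raises only outside Pre_), so plain getD is exact there.
def pvD (way : List (List (String × Int))) (i : Nat) : Bool × Bool :=
  pvDir (way.getD i []) (way.getD (i + 1) [])

-- B's inner while loop: extend j over the maximal run of steps with direction d
def pvRun (way : List (List (String × Int))) (n1 : Nat) (d : Bool × Bool) (j : Nat) : Nat :=
  if h : j + 1 < n1 ∧ pvD way (j + 1) = d then pvRun way n1 d (j + 1) else j
termination_by n1 - j
decreasing_by omega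

theorem pvRun_ge (way : List (List (String × Int))) (n1 : Nat) (d : Bool × Bool) (j : Nat) :
    j ≤ pvRun way n1 d j := by
  fun_induction pvRun with
  | case1 j h ih => omega
  | case2 j h => omega

-- B's outer while loop, carrying the result list and the index i; emits way[j+1]
-- only for interior run boundaries (j+1 < n1)
def pvOuter (way : List (List (String × Int))) (n1 : Nat)
    (acc : List (List (String × Int))) (i : Nat) : List (List (String × Int)) :=
  if h : i < n1 then
    pvOuter way n1
      (acc ++ (if pvRun way n1 (pvD way i) i + 1 < n1 then
                [way.getD (pvRun way n1 (pvD way i) i + 1) []] else []))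
      (pvRun way n1 (pvD way i) i + 1)
  else acc
termination_by n1 - i
decreasing_by have := pvRun_ge way n1 (pvD way i) i; omega

def findWayStage_alt (way : List (List (String × Int))) : List (List (String × Int)) :=
  pvOuter way (way.length - 1) [way.getD 0 []] 0 ++ [way.getD (way.length - 1) []]

-- ===== PRECONDITION & SPEC =====
-- Pre_ excludes exactly the inputs on which Python A raises: the empty list (IndexError on
-- way[0]) and, when the loop body runs (len ≥ 2), any point missing an "x" or "y" key (KeyError).
def Pre_findWayStage (way : List (List (String × Int))) : Prop :=
  way ≠ [] ∧ (2 ≤ way.length →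
    ∀ p ∈ way, ((PySem.Dict.mk p).get? "x").isSome ∧ ((PySem.Dict.mk p).get? "y").isSome)
instance (way : List (List (String × Int))) : Decidable (Pre_findWayStage way) := by
  unfold Pre_findWayStage; infer_instance

def pvWitness_findWayStage : (List (List (String × Int))) :=
  [[("x", 0), ("y", 0)], [("x", 1), ("y", 0)], [("x", 2), ("y", 0)], [("x", 2), ("y", 1)]]

def Spec_findWayStage (way : List (List (String × Int))) (out : List (List (String × Int))) : Prop := out = findWayStage_alt way
instance (way : List (List (String × Int))) (out : List (List (String × Int))) : Decidable (Spec_findWayStage way out) := by unfold Spec_findWayStage; infer_instance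

-- ===== CLAIM (what is proved, stated in full; the proofs are below) =====
def Claim_equal_findWayStage : Prop := ∀ (way : List (List (String × Int))), Dom_findWayStage way → Pre_findWayStage way → Spec_findWayStage way (findWayStage way)

-- ===== LEMMAS AND PROOFS =====

-- break indices produced while A scans segments 1..m
def pvBrk (way : List (List (String × Int))) (m : Nat) : List Int :=
  (List.range m).filterMap
    (fun j => if pvD way (j + 1) ≠ pvD way j then some ((j : Int) + 1) else none)

theorem pvBrk_succ (way : List (List (String × Int))) (k : Nat) :
    pvBrk way (k + 1) =
      pvBrk way k ++ (if pvD way (k + 1) ≠ pvD way k then [(k : Int) + 1] else []) := by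
  unfold pvBrk
  rw [List.range_succ, List.filterMap_append]
  split_ifs with h <;> simp [h]

theorem pvNext_eq (way : List (List (String × Int))) (j : Nat) :
    (PySem.List.pyGet? way ((j : Int) + 1)).getD [] = way.getD (j + 1) [] := by
  have h : ((j : Int) + 1) = ((j + 1 : Nat) : Int) := by push_cast; ring
  rw [h, PySem.List.pyGet?_natCast, ← List.getD_eq_getElem?_getD]

theorem pvIdx_cast (way : List (List (String × Int))) (k : Nat) :
    (PySem.List.pyGet? way ((k : Nat) : Int)).getD [] = way.getD k [] := by
  rw [PySem.List.pyGet?_natCast, ← List.getD_eq_getElem?_getD]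

theorem stepA_succ (way : List (List (String × Int))) (st : List Int × (Bool × Bool)) (j : Nat)
    (h0 : 1 ≤ j) (hj : j < way.length - 1) :
    pvStepA way st ((j : Int), way.getD j []) =
      (if pvD way j ≠ st.2 then st.1 ++ [(j : Int)] else st.1, pvD way j) := by
  have h1 : ((j : Int)) ≠ (way.length : Int) - 1 := by
    have : j < way.length - 1 := hj
    omega
  have h2 : ((j : Int)) ≠ 0 := by omega
  simp only [pvStepA, if_pos h1, if_neg h2, pvNext_eq, pvD, pvDir]
  rfl

theorem stepA_zero (way : List (List (String × Int))) (L : List Int)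
    (hj : 0 < way.length - 1) :
    pvStepA way (L, (false, false)) ((0 : Int), way.getD 0 []) = (L, pvD way 0) := by
  have h1 : ((0 : Int)) ≠ (way.length : Int) - 1 := by
    have : 0 < way.length - 1 := hj
    omega
  have h : (PySem.List.pyGet? way ((0 : Int) + 1)).getD [] = way.getD 1 [] := by
    have := pvNext_eq way 0
    simpa using this
  simp only [pvStepA, if_pos h1, h, pvD, pvDir]
  simp

theorem stepA_last (way : List (List (String × Int))) (st : List Int × (Bool × Bool))
    (h : 1 ≤ way.length) :
    pvStepA way st ((((way.length - 1 : Nat)) : Int), way.getD (way.length - 1) []) =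
      (st.1, (false, false)) := by
  have h1 : (((way.length - 1 : Nat)) : Int) = (way.length : Int) - 1 := by
    push_cast [Nat.cast_sub h]; ring
  simp only [pvStepA, h1]
  rw [if_neg (not_not_intro rfl)]

theorem foldA_range (way : List (List (String × Int))) :
    (PySem.List.enumerate way 0).foldl (pvStepA way) ([0], (false, false)) =
      (List.range way.length).foldl
        (fun st (j : Nat) => pvStepA way st ((j : Int), way.getD j [])) ([0], (false, false)) := by
  rw [PySem.List.enumerate_eq_map_pyRange way [], PySem.List.pyRange_one, List.foldl_map,
    List.foldl_map]
  have hlen : ((PySem.List.len way - 0).toNat) = way.length := by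
    simp [PySem.List.len]
  rw [hlen]
  have hf : (fun (st : List Int × (Bool × Bool)) (k : Nat) =>
      pvStepA way st ((0 : Int) + ↑k, PySem.List.pyGetD way ((0 : Int) + ↑k) [])) =
      (fun st (j : Nat) => pvStepA way st ((j : Int), way.getD j [])) := by
    funext st k
    rw [zero_add, PySem.List.pyGetD_natCast]
  rw [hf]

-- the loop invariant of A's scan
theorem foldA_inv (way : List (List (String × Int))) (k : Nat)
    (hk : k + 1 ≤ way.length - 1) :
    (List.range (k + 1)).foldl
        (fun st (j : Nat) => pvStepA way st ((j : Int), way.getD j [])) ([0], (false, false)) =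
      ((0 : Int) :: pvBrk way k, pvD way k) := by
  induction k with
  | zero =>
    rw [show (0 + 1 : Nat) = 1 from rfl, List.range_one]
    simp only [List.foldl_cons, List.foldl_nil, Nat.cast_zero]
    rw [stepA_zero way [0] (by omega)]
    simp [pvBrk]
  | succ k ih =>
    rw [List.range_succ, List.foldl_append, ih (by omega)]
    simp only [List.foldl_cons, List.foldl_nil]
    rw [stepA_succ way _ (k + 1) (by omega) (by omega)]
    rw [pvBrk_succ]
    split_ifs with h <;> simp

-- ===== B-side lemmas =====

-- the change indices B would emit from position i on (proof-side characterisation)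
def pvChg (way : List (List (String × Int))) (n1 : Nat) (i : Nat) : List Nat :=
  if i + 1 < n1 then
    (if pvD way (i + 1) ≠ pvD way i then [i + 1] else []) ++ pvChg way n1 (i + 1)
  else []
termination_by n1 - i

theorem pvOuter_append (way : List (List (String × Int))) (n1 : Nat) :
    ∀ m i acc, n1 - i ≤ m →
      pvOuter way n1 acc i = acc ++ pvOuter way n1 [] i := by
  intro m
  induction m with
  | zero =>
    intro i acc hm
    rw [pvOuter, dif_neg (by omega : ¬ i < n1), pvOuter, dif_neg (by omega : ¬ i < n1)]
    simp
  | succ m ih =>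
    intro i acc hm
    by_cases h : i < n1
    · have hge := pvRun_ge way n1 (pvD way i) i
      rw [pvOuter, dif_pos h]
      conv_rhs => rw [pvOuter, dif_pos h]
      rw [ih _ _ (by omega), ih _ ([] ++ _) (by omega)]
      simp
    · rw [pvOuter, dif_neg h, pvOuter, dif_neg h]
      simp

theorem chg_skip (way : List (List (String × Int))) (n1 : Nat) :
    ∀ m i, n1 - i ≤ m → i < n1 →
      pvChg way n1 i =
        (if pvRun way n1 (pvD way i) i + 1 < n1 then
          (pvRun way n1 (pvD way i) i + 1) :: pvChg way n1 (pvRun way n1 (pvD way i) i + 1)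
        else []) := by
  intro m
  induction m with
  | zero => intro i hm hi; omega
  | succ m ih =>
    intro i hm hi
    by_cases hstep : i + 1 < n1 ∧ pvD way (i + 1) = pvD way i
    · -- inner loop advances: no change at i+1
      have hrun : pvRun way n1 (pvD way i) i = pvRun way n1 (pvD way i) (i + 1) := by
        rw [pvRun, dif_pos hstep]
      have hchg : pvChg way n1 i = pvChg way n1 (i + 1) := by
        rw [pvChg, if_pos hstep.1, if_neg (not_not_intro hstep.2)]
        simp
      have hih := ih (i + 1) (by omega) hstep.1
      rw [hstep.2] at hih
      rw [hchg, hrun]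
      exact hih
    · -- inner loop stops at i
      have hrun : pvRun way n1 (pvD way i) i = i := by
        rw [pvRun, dif_neg hstep]
      rw [hrun]
      by_cases h1 : i + 1 < n1
      · have hne : pvD way (i + 1) ≠ pvD way i := fun he => hstep ⟨h1, he⟩
        rw [pvChg, if_pos h1, if_pos hne, if_pos h1]
        simp
      · rw [pvChg, if_neg h1, if_neg h1]

theorem outer_spec (way : List (List (String × Int))) (n1 : Nat) :
    ∀ m i, n1 - i ≤ m →
      pvOuter way n1 [] i = (pvChg way n1 i).map (fun b => way.getD b []) := by
  intro m
  induction m with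
  | zero =>
    intro i hm
    rw [pvOuter, dif_neg (by omega : ¬ i < n1), pvChg, if_neg (by omega : ¬ i + 1 < n1)]
    simp
  | succ m ih =>
    intro i hm
    by_cases hi : i < n1
    · rw [pvOuter, dif_pos hi,
        pvOuter_append way n1 (n1 - (pvRun way n1 (pvD way i) i + 1)) _ _ (le_refl _)]
      rw [chg_skip way n1 (m + 1) i hm hi]
      have hge := pvRun_ge way n1 (pvD way i) i
      by_cases h1 : pvRun way n1 (pvD way i) i + 1 < n1
      · rw [if_pos h1, if_pos h1, ih (pvRun way n1 (pvD way i) i + 1) (by omega)]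
        simp
      · rw [if_neg h1, if_neg h1, ih (pvRun way n1 (pvD way i) i + 1) (by omega)]
        rw [pvChg, if_neg (by omega : ¬ pvRun way n1 (pvD way i) i + 1 + 1 < n1)]
        simp
    · rw [pvOuter, dif_neg hi, pvChg, if_neg (by omega : ¬ i + 1 < n1)]
      simp

theorem chg_cast (way : List (List (String × Int))) (n1 : Nat) :
    ∀ m i, n1 - i ≤ m →
      pvChg way n1 i =
        (List.range' i (n1 - 1 - i)).filterMap
          (fun j => if pvD way (j + 1) ≠ pvD way j then some (j + 1) else none) := by
  intro m
  induction m with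
  | zero =>
    intro i hm
    have h1 : ¬ i + 1 < n1 := by omega
    have h2 : n1 - 1 - i = 0 := by omega
    rw [pvChg, if_neg h1, h2]
    simp
  | succ m ih =>
    intro i hm
    by_cases h1 : i + 1 < n1
    · have h2 : n1 - 1 - i = (n1 - 1 - (i + 1)) + 1 := by omega
      rw [pvChg, if_pos h1, h2, List.range'_succ, List.filterMap_cons, ih (i + 1) (by omega)]
      by_cases hc : pvD way (i + 1) ≠ pvD way i
      · simp [hc]
      · simp [hc]
    · have h2 : n1 - 1 - i = 0 := by omega
      rw [pvChg, if_neg h1, h2]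
      simp

theorem brk_eq_chg (way : List (List (String × Int))) (n1 : Nat) :
    pvBrk way (n1 - 1) = (pvChg way n1 0).map (fun k => Int.ofNat k) := by
  rw [chg_cast way n1 (n1 - 0) 0 (le_refl _), List.map_filterMap]
  unfold pvBrk
  rw [List.range_eq_range']
  simp only [Nat.sub_zero]
  apply List.filterMap_congr
  intro j _
  by_cases hc : pvD way (j + 1) ≠ pvD way j
  · simp [hc]
  · simp [hc]

-- ===== VERDICT proofs =====

theorem findWayStage_one (p : List (String × Int)) :
    findWayStage [p] = [p, p] ∧ findWayStage_alt [p] = [p, p] := by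
  constructor
  · simp [findWayStage, pvStepA, PySem.List.enumerate, PySem.List.pyGet?, PySem.List.pyIdx?]
  · rw [findWayStage_alt]
    rw [pvOuter]
    simp

theorem findWayStage_spec : Claim_equal_findWayStage := by
  intro way _ hpre
  unfold Spec_findWayStage
  obtain ⟨hne, -⟩ := hpre
  have hn1 : 1 ≤ way.length := List.length_pos_iff.mpr hne
  by_cases hn2 : 2 ≤ way.length
  case neg =>
    have h1 : way.length = 1 := by omega
    obtain ⟨p, hp⟩ := List.length_eq_one_iff.mp h1
    subst hp
    rw [(findWayStage_one p).1, (findWayStage_one p).2]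
  case pos =>
  set n1 := way.length - 1 with hn1def
  have hn1pos : 1 ≤ n1 := by omega
  -- evaluate A
  have hA : findWayStage way =
      (((0 : Int) :: pvBrk way (way.length - 2)) ++ [(way.length : Int) - 1]).map
        (fun idx => (PySem.List.pyGet? way idx).getD []) := by
    simp only [findWayStage]
    rw [foldA_range]
    have hsplit : way.length = (way.length - 1) + 1 := by omega
    rw [hsplit, List.range_succ, List.foldl_append]
    have hinv := foldA_inv way (way.length - 2) (by omega)
    have hk : way.length - 2 + 1 = way.length - 1 := by omega
    rw [hk] at hinv
    rw [hinv]
    simp only [List.foldl_cons, List.foldl_nil]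
    rw [stepA_last way _ hn1]
    rw [← hsplit]
  -- evaluate B
  have hB : findWayStage_alt way =
      way.getD 0 [] :: ((pvChg way n1 0).map (fun b => way.getD b []) ++
        [way.getD (way.length - 1) []]) := by
    simp only [findWayStage_alt, ← hn1def]
    rw [pvOuter_append way n1 (n1 - 0) 0 _ (le_refl _), outer_spec way n1 (n1 - 0) 0 (le_refl _)]
    simp
  rw [hA, hB]
  have hbrk := brk_eq_chg way n1
  have hlast : ((way.length : Int) - 1) = ((n1 : Nat) : Int) := by
    push_cast [hn1def, Nat.cast_sub hn1]; ring
  have hm2 : way.length - 2 = n1 - 1 := by omega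
  rw [hm2, hbrk, hlast]
  simp only [List.cons_append, List.map_cons, List.map_append, List.map_map, List.map_nil]
  congr 1
  · simpa using pvIdx_cast way 0
  congr 1
  · apply List.map_congr_left
    intro k _
    simp only [Function.comp_apply, Int.ofNat_eq_natCast]
    exact pvIdx_cast way k
  · congr 1
    rw [pvIdx_cast way n1, hn1def]
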